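-- pv_equiv track=rewrite | github.com/forthcoming/algorithm | leet_code.py | leet_code_36
-- ===== SOURCE A (Python) =====
-- def leet_code_36(arr, k):  # 优雅子数组
--     result = 0
--     length = len(arr)
--     for i in range(length):  # i是子数组起点
--         count = {}
--         flag = False
--         for j in range(i, length):  # j是子数组终点
--             key = arr[j]
--             if key in count:
--                 count[key] += 1
--             else:
--                 count[key] = 1
--             if count[key] == k:
--                 flag = True
--             if flag:
--                 if count[key] <= k:
--                     result += 1
--                 else:
--                     break
--     return result
-- ===== SOURCE B (Python) =====
-- def leet_code_36(arr, k):  # count subarrays whose maximum element-frequency is exactly k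
--     if k <= 0:
--         return 0
--
--     def at_most(m):  # subarrays in which every element occurs at most m times
--         cnt = {}
--         res = 0
--         left = 0
--         for right, x in enumerate(arr):
--             cnt[x] = cnt.get(x, 0) + 1
--             while cnt[x] > m:
--                 y = arr[left]
--                 cnt[y] = cnt[y] - 1
--                 left += 1
--             res += right - left + 1
--         return res
--
--     return at_most(k) - at_most(k - 1)
-- ===== Notes on version B (the rewrite author's own statement) =====
-- stated objective: faster
-- what changed: A rescans a fresh Counter from every start index (quadratic nested loops with an early break); B makes two linear sliding-window passes and returns at_most(k) - at_most(k-1), the count of subarrays whose maximum element frequency is exactly k.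
import Mathlib
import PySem

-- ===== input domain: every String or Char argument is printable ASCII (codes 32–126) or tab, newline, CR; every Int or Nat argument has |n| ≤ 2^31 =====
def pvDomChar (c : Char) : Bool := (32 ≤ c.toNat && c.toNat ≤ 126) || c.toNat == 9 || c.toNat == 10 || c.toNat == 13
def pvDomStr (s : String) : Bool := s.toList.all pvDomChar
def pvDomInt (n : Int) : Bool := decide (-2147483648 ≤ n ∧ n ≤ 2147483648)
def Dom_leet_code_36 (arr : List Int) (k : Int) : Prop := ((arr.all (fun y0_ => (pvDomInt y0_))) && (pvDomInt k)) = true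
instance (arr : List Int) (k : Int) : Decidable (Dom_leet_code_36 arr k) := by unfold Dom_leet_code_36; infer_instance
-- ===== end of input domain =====

-- B replaces A's O(n^2) start-anchored rescans with two O(n) sliding-window passes:
-- answer = (#subarrays with all frequencies ≤ k) - (#subarrays with all frequencies ≤ k-1).

-- ===== PORT A =====
-- inner loop of A: j runs over the rest of the array, Counter `count`, `flag`, accumulator `res`; early `break` returns res
def aInner (k : Int) : List Int → PySem.Dict Int Int → Bool → Int → Int
  | [], _, _, res => res
  | key :: rest, count, flag, res =>
    let count' := if count.contains key then count.insert key (count.getD key 0 + 1) else count.insert key 1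
    let flag' := if count'.getD key 0 == k then true else flag
    if flag' then
      if count'.getD key 0 ≤ k then aInner k rest count' flag' (res + 1)
      else res
    else aInner k rest count' flag' res

-- outer loop of A: each start index i ⇔ each tail of arr; fresh dict and flag per start
def aOuter (k : Int) : List Int → Int → Int
  | [], res => res
  | x :: rest, res => aOuter k rest (aInner k (x :: rest) PySem.Dict.empty false res)

def leet_code_36 (arr : List Int) (k : Int) : Int := aOuter k arr 0

-- ===== PORT B =====
-- the `while cnt[x] > m:` loop; fuel = len(arr) bounds the number of left-pointer steps (left never passes right)
def bShrink (m x : Int) (arr : List Int) : Nat → PySem.Dict Int Int → Int → PySem.Dict Int Int × Int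
  | 0, cnt, left => (cnt, left)
  | fuel + 1, cnt, left =>
    if m < cnt.getD x 0 then
      let y := (PySem.List.pyGet? arr left).getD 0
      bShrink m x arr fuel (cnt.insert y (cnt.getD y 0 - 1)) (left + 1)
    else (cnt, left)

-- `for right, x in enumerate(arr):` of at_most, state (cnt, left, res)
def bLoop (m : Int) (arr : List Int) : List (Int × Int) → PySem.Dict Int Int → Int → Int → Int
  | [], _, _, res => res
  | (right, x) :: rest, cnt, left, res =>
    let cnt' := cnt.insert x (cnt.getD x 0 + 1)
    let p := bShrink m x arr arr.length cnt' left
    bLoop m arr rest p.1 p.2 (res + (right - p.2 + 1))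

def bAtMost (m : Int) (arr : List Int) : Int := bLoop m arr (PySem.List.enumerate arr 0) PySem.Dict.empty 0 0

def leet_code_36_alt (arr : List Int) (k : Int) : Int :=
  if k ≤ 0 then 0 else bAtMost k arr - bAtMost (k - 1) arr

-- ===== PRECONDITION & SPEC =====
def Spec_leet_code_36 (arr : List Int) (k : Int) (out : Int) : Prop := out = leet_code_36_alt arr k
instance (arr : List Int) (k : Int) (out : Int) : Decidable (Spec_leet_code_36 arr k out) := by unfold Spec_leet_code_36; infer_instance

-- ===== CLAIM (what is proved, stated in full; the proofs are below) =====
def Claim_equal_leet_code_36 : Prop := ∀ (arr : List Int) (k : Int), Dom_leet_code_36 arr k → Spec_leet_code_36 arr k (leet_code_36 arr k)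

-- ===== LEMMAS AND PROOFS =====

-- a window is m-good when every element occurs at most m times in it
def goodAll (m : Int) (w : List Int) : Bool := w.all (fun x => (w.count x : Int) ≤ m)
-- window counted by A: all frequencies ≤ k and some frequency = k
def goodEx (k : Int) (w : List Int) : Bool := goodAll k w && w.any (fun x => (w.count x : Int) == k)

-- number of nonempty prefixes q of l with goodEx k (p ++ q)
def countGood (k : Int) : List Int → List Int → Int
  | _, [] => 0
  | p, x :: rest => (if goodEx k (p ++ [x]) then 1 else 0) + countGood k (p ++ [x]) rest

-- number of nonempty prefixes q of l with goodAll m (p ++ q)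
def prefGood (m : Int) : List Int → List Int → Int
  | _, [] => 0
  | p, x :: rest => (if goodAll m (p ++ [x]) then 1 else 0) + prefGood m (p ++ [x]) rest

def totalA (k : Int) : List Int → Int
  | [] => 0
  | x :: rest => countGood k [] (x :: rest) + totalA k rest

def sumT (m : Int) : List Int → Int
  | [] => 0
  | x :: rest => prefGood m [] (x :: rest) + sumT m rest

-- longest suffix s of w with count of x in s ≤ m (what the while-loop leaves)
def trimTo (m x : Int) : List Int → List Int
  | [] => []
  | y :: w => if m < (((y :: w).count x : Nat) : Int) then trimTo m x w else y :: w

-- longest m-good suffix of w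
def trimAll (m : Int) : List Int → List Int
  | [] => []
  | y :: w => if goodAll m (y :: w) then y :: w else trimAll m w

def IsLGS (m : Int) (l w : List Int) : Prop :=
  w <:+ l ∧ goodAll m w = true ∧ ∀ s, s <:+ l → goodAll m s = true → s.length ≤ w.length

def winSum (m : Int) (arr : List Int) (R : Nat) : Int :=
  ∑ t ∈ Finset.range (arr.length - R), ((trimAll m (arr.take (R + t + 1))).length : Int)

-- count in a one-element extension
lemma count_concat (p : List Int) (key x : Int) :
    (p ++ [key]).count x = p.count x + (if x = key then 1 else 0) := by
  by_cases h : x = key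
  · subst h; rw [List.count_append, if_pos rfl]; simp
  · rw [List.count_append, if_neg h]
    have : List.count x [key] = 0 := List.count_eq_zero.mpr (by simp [h])
    omega

lemma mem_of_count_eq_pos {p : List Int} {x k : Int} (hk : 1 ≤ k) (h : (p.count x : Int) = k) : x ∈ p := by
  have : 0 < p.count x := by omega
  exact List.count_pos_iff.mp this

lemma goodAll_iff {m : Int} {w : List Int} :
    goodAll m w = true ↔ ∀ x ∈ w, (w.count x : Int) ≤ m := by
  simp [goodAll]

lemma goodEx_iff {k : Int} {w : List Int} :
    goodEx k w = true ↔ (∀ x ∈ w, (w.count x : Int) ≤ k) ∧ (∃ x ∈ w, (w.count x : Int) = k) := by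
  simp [goodEx, goodAll, List.any_eq_true]

lemma goodAll_of_sublist {m : Int} {s w : List Int} (h : s.Sublist w) (hw : goodAll m w = true) :
    goodAll m s = true := by
  simp only [goodAll, List.all_eq_true, decide_eq_true_eq] at *
  intro x hx
  have h1 := List.Sublist.count_le x h
  have h2 := hw x (h.subset hx)
  omega

lemma goodAll_mono {m m' : Int} (hm : m ≤ m') {w : List Int} (hw : goodAll m w = true) :
    goodAll m' w = true := by
  simp only [goodAll, List.all_eq_true, decide_eq_true_eq] at *
  intro x hx
  exact le_trans (hw x hx) hm

-- A with k ≤ 0 never sets the flag and counts nothing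
lemma aInner_nonpos {k : Int} (hk : k ≤ 0) :
    ∀ (l : List Int) (cnt : PySem.Dict Int Int) (res : Int),
      (∀ x, 0 ≤ cnt.getD x 0) → aInner k l cnt false res = res := by
  intro l
  induction l with
  | nil => intro cnt res _; rfl
  | cons key rest ih =>
    intro cnt res hpos
    simp only [aInner]
    set cnt' := if cnt.contains key then cnt.insert key (cnt.getD key 0 + 1) else cnt.insert key 1 with hcnt'
    have hval : 1 ≤ cnt'.getD key 0 := by
      rw [hcnt']
      by_cases hc : cnt.contains key
      · rw [if_pos hc, PySem.Dict.getD_insert_self]; have := hpos key; omega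
      · rw [if_neg hc, PySem.Dict.getD_insert_self]
    have hne : (cnt'.getD key 0 == k) = false := by
      simp only [beq_eq_false_iff_ne, ne_eq]; omega
    rw [hne]
    simp only [Bool.false_eq_true, if_false]
    apply ih
    intro x
    rw [hcnt']
    by_cases hc : cnt.contains key
    · rw [if_pos hc, PySem.Dict.getD_insert]
      split
      · have := hpos key; omega
      · exact hpos x
    · rw [if_neg hc, PySem.Dict.getD_insert]
      split
      · omega
      · exact hpos x

lemma countGood_zero {k : Int} (hk : 0 ≤ k) :
    ∀ (l p : List Int), (∃ x, k < (p.count x : Int)) → countGood k p l = 0 := by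
  intro l
  induction l with
  | nil => intro p _; rfl
  | cons a rest ih =>
    intro p hp
    obtain ⟨x, hx⟩ := hp
    have hxp : x ∈ p := List.count_pos_iff.mp (by omega)
    have hxc : k < ((p ++ [a]).count x : Int) := by
      rw [count_concat]; push_cast; split <;> omega
    have hbad : goodEx k (p ++ [a]) = false := by
      rw [Bool.eq_false_iff, ne_eq, goodEx_iff]
      intro ⟨hall, _⟩
      have := hall x (List.mem_append_left _ hxp)
      omega
    simp only [countGood, hbad, Bool.false_eq_true, if_false, zero_add]
    exact ih (p ++ [a]) ⟨x, hxc⟩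

lemma aInner_spec {k : Int} (hk : 1 ≤ k) :
    ∀ (l p : List Int) (cnt : PySem.Dict Int Int) (flag : Bool) (res : Int),
      (∀ x, cnt.getD x 0 = (p.count x : Int)) →
      (∀ x, (p.count x : Int) ≤ k) →
      (flag = true ↔ ∃ x, (p.count x : Int) = k) →
      aInner k l cnt flag res = res + countGood k p l := by
  intro l
  induction l with
  | nil => intro p cnt flag res _ _ _; simp [aInner, countGood]
  | cons key rest ih =>
    intro p cnt flag res hcnt hle hflag
    simp only [aInner, countGood]
    set cnt' := if cnt.contains key then cnt.insert key (cnt.getD key 0 + 1) else cnt.insert key 1 with hcnt'd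
    have hcnt' : ∀ x, cnt'.getD x 0 = (((p ++ [key]).count x : Nat) : Int) := by
      intro x
      have hgd : cnt'.getD x 0 = (if x = key then cnt.getD key 0 + 1 else cnt.getD x 0) := by
        rw [hcnt'd]
        by_cases hc : cnt.contains key
        · rw [if_pos hc, PySem.Dict.getD_insert]
        · have hcf : cnt.contains key = false := by simpa using hc
          have h0 : cnt.getD key 0 = 0 := by
            rw [PySem.Dict.getD_of_not_contains _ _ hcf]
          rw [if_neg hc, PySem.Dict.getD_insert, h0]
          norm_num
      rw [hgd]
      by_cases h : x = key
      · rw [if_pos h, hcnt key, h, count_concat]; push_cast; simp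
      · rw [if_neg h, hcnt x, count_concat]; push_cast; simp [h]
    have hval : cnt'.getD key 0 = (((p ++ [key]).count key : Nat) : Int) := hcnt' key
    have hkeyc : (((p ++ [key]).count key : Nat) : Int) = (p.count key : Int) + 1 := by
      rw [count_concat]; push_cast; simp
    have hothc : ∀ x, x ≠ key → ((p ++ [key]).count x : Int) = (p.count x : Int) := by
      intro x hx; rw [count_concat]; push_cast; simp [hx]
    by_cases hck : (((p ++ [key]).count key : Nat) : Int) = k
    · -- the new count hits k: flag becomes true, window is counted
      have hbeq : (cnt'.getD key 0 == k) = true := by rw [hval]; simpa using hck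
      rw [hbeq]
      simp only [if_true]
      have hle2 : cnt'.getD key 0 ≤ k := by rw [hval]; omega
      rw [if_pos hle2]
      have hgood : goodEx k (p ++ [key]) = true := by
        rw [goodEx_iff]
        constructor
        · intro x _
          by_cases hx : x = key
          · rw [hx]; omega
          · rw [hothc x hx]; exact hle x
        · exact ⟨key, List.mem_append_right _ (by simp), hck⟩
      rw [hgood]
      have := ih (p ++ [key]) cnt' true (res + 1) hcnt'
        (by intro x; by_cases hx : x = key
            · rw [hx]; omega
            · rw [hothc x hx]; exact hle x)
        (by simp only [true_iff]; exact ⟨key, hck⟩)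
      rw [this]; simp; ring
    · have hbeq : (cnt'.getD key 0 == k) = false := by
        rw [hval]; simpa using hck
      rw [hbeq]
      simp only [Bool.false_eq_true, if_false]
      cases flag with
      | true =>
        simp only [if_true]
        obtain ⟨x, hx⟩ := hflag.mp rfl
        by_cases hleq : cnt'.getD key 0 ≤ k
        · rw [if_pos hleq]
          rw [hval] at hleq
          have hxkey : x ≠ key := by
            intro h; rw [h] at hx; omega
          have hgood : goodEx k (p ++ [key]) = true := by
            rw [goodEx_iff]
            constructor
            · intro z _
              by_cases hz : z = key
              · rw [hz]; omega
              · rw [hothc z hz]; exact hle z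
            · exact ⟨x, List.mem_append_left _ (mem_of_count_eq_pos hk hx),
                by rw [hothc x hxkey]; exact hx⟩
          rw [hgood]
          have := ih (p ++ [key]) cnt' true (res + 1) hcnt'
            (by intro z; by_cases hz : z = key
                · rw [hz]; omega
                · rw [hothc z hz]; exact hle z)
            (by simp only [true_iff]; exact ⟨x, by rw [hothc x hxkey]; exact hx⟩)
          rw [this]; simp; ring
        · rw [if_neg hleq]
          rw [hval] at hleq
          have hbad : goodEx k (p ++ [key]) = false := by
            rw [Bool.eq_false_iff, ne_eq, goodEx_iff]
            intro ⟨hall, _⟩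
            have := hall key (List.mem_append_right _ (by simp))
            omega
          rw [hbad]
          rw [countGood_zero (by omega) rest (p ++ [key]) ⟨key, by omega⟩]
          simp
      | false =>
        simp only [Bool.false_eq_true, if_false]
        have hnex : ¬ ∃ x, (p.count x : Int) = k := by
          intro h; exact absurd (hflag.mpr h) (by simp)
        have hc'le : cnt'.getD key 0 ≤ k := by
          rw [hval, hkeyc]
          have := hle key
          rcases lt_or_eq_of_le this with h | h
          · omega
          · exact absurd ⟨key, h⟩ hnex
        have hbad : goodEx k (p ++ [key]) = false := by
          rw [Bool.eq_false_iff, ne_eq, goodEx_iff]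
          intro ⟨_, x, _, hx⟩
          by_cases hz : x = key
          · rw [hz] at hx; exact hck hx
          · rw [hothc x hz] at hx; exact hnex ⟨x, hx⟩
        rw [hbad]
        have := ih (p ++ [key]) cnt' false res hcnt'
          (by intro z; by_cases hz : z = key
              · rw [hz]; rw [hval] at hc'le; omega
              · rw [hothc z hz]; exact hle z)
          (by simp only [Bool.false_eq_true, false_iff]
              intro ⟨x, hx⟩
              by_cases hz : x = key
              · rw [hz] at hx; exact hck hx
              · rw [hothc x hz] at hx; exact hnex ⟨x, hx⟩)
        rw [this]; simp

lemma aOuter_spec {k : Int} (hk : 1 ≤ k) :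
    ∀ (l : List Int) (res : Int), aOuter k l res = res + totalA k l := by
  intro l
  induction l with
  | nil => intro res; simp [aOuter, totalA]
  | cons x rest ih =>
    intro res
    simp only [aOuter, totalA]
    rw [ih, aInner_spec hk (x :: rest) [] PySem.Dict.empty false res
      (by intro z; simp [PySem.Dict.getD_empty])
      (by intro z; simp; omega)
      (by simp only [Bool.false_eq_true, false_iff]; intro ⟨z, hz⟩; simp at hz; omega)]
    ring

lemma countGood_decomp (k : Int) :
    ∀ (l p : List Int), countGood k p l = prefGood k p l - prefGood (k - 1) p l := by
  intro l
  induction l with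
  | nil => intro p; simp [countGood, prefGood]
  | cons x rest ih =>
    intro p
    simp only [countGood, prefGood]
    rw [ih (p ++ [x])]
    have hind : (if goodEx k (p ++ [x]) then (1:Int) else 0)
        = (if goodAll k (p ++ [x]) then (1:Int) else 0) - (if goodAll (k-1) (p ++ [x]) then (1:Int) else 0) := by
      by_cases hka : goodAll k (p ++ [x]) = true
      · by_cases ha : goodAll (k-1) (p ++ [x]) = true
        · have hbad : goodEx k (p ++ [x]) = false := by
            rw [Bool.eq_false_iff, ne_eq, goodEx_iff]
            intro ⟨_, z, hz, hzc⟩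
            have := goodAll_iff.mp ha z hz
            omega
          rw [hbad, hka, ha]; simp
        · have hgood : goodEx k (p ++ [x]) = true := by
            rw [goodEx_iff]
            refine ⟨goodAll_iff.mp hka, ?_⟩
            by_contra hno
            push Not at hno
            apply ha
            rw [goodAll_iff]
            intro z hz
            have h1 := goodAll_iff.mp hka z hz
            have h2 := hno z hz
            omega
          rw [hgood, hka, Bool.eq_false_iff.mpr ha]; simp
      · have hb : goodAll (k-1) (p ++ [x]) ≠ true := by
          intro h; exact hka (goodAll_mono (by omega) h)
        have hbad : goodEx k (p ++ [x]) = false := by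
          rw [Bool.eq_false_iff, ne_eq, goodEx_iff]
          intro ⟨hall, _⟩
          exact hka (goodAll_iff.mpr hall)
        rw [hbad, Bool.eq_false_iff.mpr hka, Bool.eq_false_iff.mpr hb]; simp
    rw [hind]; ring

lemma totalA_decomp (k : Int) (l : List Int) : totalA k l = sumT k l - sumT (k - 1) l := by
  induction l with
  | nil => simp [totalA, sumT]
  | cons x rest ih =>
    simp only [totalA, sumT]
    rw [ih, countGood_decomp]
    ring

lemma trimAll_isLGS (m : Int) : ∀ l : List Int, IsLGS m l (trimAll m l) := by
  intro l
  induction l with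
  | nil => exact ⟨List.suffix_refl _, by simp [goodAll, trimAll], fun s hs _ => hs.length_le⟩
  | cons y w ih =>
    by_cases h : goodAll m (y :: w) = true
    · exact ⟨by rw [trimAll, if_pos h], by rw [trimAll, if_pos h]; exact h,
        fun s hs _ => by rw [trimAll, if_pos h]; exact hs.length_le⟩
    · refine ⟨by simp [trimAll, h]; exact ih.1.trans (List.suffix_cons y w), by simp [trimAll, h]; exact ih.2.1, ?_⟩
      intro s hs hgs
      rcases List.suffix_cons_iff.mp hs with rfl | hs'
      · exact absurd hgs h
      · rw [trimAll, if_neg h]; exact ih.2.2 s hs' hgs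

lemma lgs_unique {m : Int} {l w₁ w₂ : List Int} (h₁ : IsLGS m l w₁) (h₂ : IsLGS m l w₂) : w₁ = w₂ := by
  have hl1 := h₁.2.2 w₂ h₂.1 h₂.2.1
  have hl2 := h₂.2.2 w₁ h₁.1 h₁.2.1
  exact List.IsSuffix.eq_of_length (List.suffix_of_suffix_length_le h₁.1 h₂.1 hl2) (by omega)

lemma trimTo_suffix (m x : Int) : ∀ w : List Int, trimTo m x w <:+ w := by
  intro w
  induction w with
  | nil => exact List.suffix_refl _
  | cons y w ih =>
    by_cases h : m < (((y :: w).count x : Nat) : Int)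
    · simp only [trimTo, if_pos h]
      exact ih.trans (List.suffix_cons y w)
    · rw [trimTo, if_neg h]

lemma trimTo_dropped (m x : Int) :
    ∀ w s : List Int, s <:+ w → (trimTo m x w).length < s.length → m < (s.count x : Int) := by
  intro w
  induction w with
  | nil => intro s hs hl; rw [List.suffix_nil.mp hs] at hl; simp at hl
  | cons y w ih =>
    intro s hs hl
    by_cases h : m < (((y :: w).count x : Nat) : Int)
    · rw [trimTo, if_pos h] at hl
      rcases List.suffix_cons_iff.mp hs with rfl | hs'
      · exact h
      · exact ih s hs' hl
    · rw [trimTo, if_neg h] at hl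
      exact absurd hs.length_le (by omega)

lemma trimTo_count (m x : Int) :
    ∀ w : List Int, trimTo m x w ≠ [] → ((trimTo m x w).count x : Int) ≤ m := by
  intro w
  induction w with
  | nil => intro h; simp [trimTo] at h
  | cons y w ih =>
    intro h
    by_cases hc : m < (((y :: w).count x : Nat) : Int)
    · rw [trimTo, if_pos hc] at h ⊢
      exact ih h
    · rw [trimTo, if_neg hc]
      omega

lemma suffix_append_right {s t : List Int} (h : s <:+ t) (l : List Int) : s ++ l <:+ t ++ l := by
  obtain ⟨u, hu⟩ := h
  exact ⟨u, by rw [← List.append_assoc, hu]⟩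

lemma suffix_concat {r w : List Int} {x : Int} (h : r <:+ w ++ [x]) :
    r = [] ∨ ∃ s, s <:+ w ∧ r = s ++ [x] := by
  rcases List.eq_nil_or_concat' r with rfl | ⟨L, b, rfl⟩
  · exact Or.inl rfl
  · obtain ⟨t, ht⟩ := h
    rw [← List.append_assoc] at ht
    obtain ⟨h1, h2⟩ := List.append_inj' ht rfl
    refine Or.inr ⟨L, ⟨t, h1⟩, ?_⟩
    rw [List.cons_eq_cons] at h2
    rw [h2.1]

lemma trimTo_isLGS {m x : Int} {p W : List Int} (hW : IsLGS m p W) :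
    IsLGS m (p ++ [x]) (trimTo m x (W ++ [x])) := by
  obtain ⟨hsuf, hgood, hmax⟩ := hW
  set r := trimTo m x (W ++ [x]) with hr
  have hrsuf : r <:+ W ++ [x] := trimTo_suffix m x (W ++ [x])
  refine ⟨hrsuf.trans (suffix_append_right hsuf [x]), ?_, ?_⟩
  · -- r is good
    rcases suffix_concat hrsuf with hnil | ⟨s, hsW, hsx⟩
    · rw [hnil]; simp [goodAll]
    · rw [goodAll_iff]
      intro z hz
      by_cases hzx : z = x
      · have hne : r ≠ [] := by rw [hsx]; simp
        rw [hzx, hr]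
        rw [hr] at hne
        exact trimTo_count m x (W ++ [x]) hne
      · rw [hsx] at hz ⊢
        have hzs : z ∈ s := by
          rcases List.mem_append.mp hz with h | h
          · exact h
          · simp at h; exact absurd h hzx
        have hcz : (s ++ [x]).count z = s.count z := by
          rw [count_concat, if_neg hzx]; omega
        rw [hcz]
        have h1 : s.count z ≤ W.count z := List.Sublist.count_le z hsW.sublist
        have h2 := goodAll_iff.mp hgood z (hsW.sublist.subset hzs)
        omega
  · -- r is longest
    intro s' hs' hgs'
    rcases suffix_concat hs' with rfl | ⟨t, htp, rfl⟩
    · simp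
    · by_cases hlen : t.length ≤ W.length
      · have htW : t <:+ W := List.suffix_of_suffix_length_le htp hsuf hlen
        have hsfx : t ++ [x] <:+ W ++ [x] := suffix_append_right htW [x]
        have hcx : ((t ++ [x]).count x : Int) ≤ m := by
          have := goodAll_iff.mp hgs' x (List.mem_append_right _ (by simp))
          exact this
        by_contra hlt
        push Not at hlt
        exact absurd (trimTo_dropped m x (W ++ [x]) (t ++ [x]) hsfx hlt) (by omega)
      · exfalso
        have hgt : goodAll m t = true :=
          goodAll_of_sublist (List.sublist_append_left t [x]) hgs'
        exact hlen (hmax t htp hgt)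

-- bShrink computes trimTo: window w is a suffix of arr.take R, left = R - |w|, cnt holds w's counts
lemma bShrink_spec {m x : Int} (hm : 0 ≤ m) (arr : List Int) (R : Nat) (hR : R ≤ arr.length) :
    ∀ (w : List Int) (fuel : Nat) (cnt : PySem.Dict Int Int),
      w <:+ arr.take R → w.length ≤ fuel →
      (∀ y, cnt.getD y 0 = (w.count y : Int)) →
      (bShrink m x arr fuel cnt ((R : Int) - w.length)).2 = (R : Int) - (trimTo m x w).length ∧
      (∀ y, (bShrink m x arr fuel cnt ((R : Int) - w.length)).1.getD y 0 = ((trimTo m x w).count y : Int)) := by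
  intro w
  induction w with
  | nil =>
    intro fuel cnt _ _ hcnt
    have hstop : ∀ g, bShrink m x arr g cnt ((R : Int) - ([] : List Int).length) = (cnt, (R : Int) - ([] : List Int).length) := by
      intro g
      cases g with
      | zero => rfl
      | succ g =>
        have : ¬ m < cnt.getD x 0 := by rw [hcnt x]; simp; omega
        simp only [bShrink, if_neg this]
    rw [hstop fuel]
    exact ⟨rfl, hcnt⟩
  | cons y w' ih =>
    intro fuel cnt hsuf hfuel hcnt
    cases fuel with
    | zero => simp at hfuel
    | succ f =>
      by_cases hc : m < cnt.getD x 0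
      · have hcx : m < (((y :: w').count x : Nat) : Int) := by rw [← hcnt x]; exact hc
        obtain ⟨pre, hpre⟩ := hsuf
        have hlen : pre.length + (w'.length + 1) = R := by
          have := congrArg List.length hpre
          simp [List.length_take] at this
          omega
        have harr2 : arr = pre ++ (y :: (w' ++ arr.drop R)) := by
          conv_lhs => rw [← List.take_append_drop R arr, ← hpre]
          simp
        have hidx : (R : Int) - ((y :: w').length : Int) = (pre.length : Int) := by
          simp only [List.length_cons]
          push_cast
          omega
        have hy : (PySem.List.pyGet? arr ((R : Int) - ((y :: w').length : Int))).getD 0 = y := by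
          rw [hidx]
          conv_lhs => rw [harr2]
          rw [PySem.List.pyGet?_append_length]
          rfl
        simp only [bShrink, if_pos hc, hy]
        have hcnt' : ∀ z, (cnt.insert y (cnt.getD y 0 - 1)).getD z 0 = (w'.count z : Int) := by
          intro z
          rw [PySem.Dict.getD_insert]
          by_cases hz : z = y
          · rw [if_pos hz, hcnt y, hz]
            have : (y :: w').count y = w'.count y + 1 := by simp
            rw [this]; push_cast; ring
          · rw [if_neg hz, hcnt z]
            have : (y :: w').count z = w'.count z := by simp [Ne.symm hz]
            rw [this]
        have hstep : (R : Int) - ((y :: w').length : Int) + 1 = (R : Int) - (w'.length : Int) := by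
          simp only [List.length_cons]; push_cast; ring
        rw [hstep]
        have htrim : trimTo m x (y :: w') = trimTo m x w' := by
          rw [trimTo, if_pos hcx]
        rw [htrim]
        exact ih f (cnt.insert y (cnt.getD y 0 - 1))
          ((List.suffix_cons y w').trans ⟨pre, hpre⟩)
          (by simp at hfuel; omega) hcnt'
      · have hcx : ¬ m < (((y :: w').count x : Nat) : Int) := by rw [← hcnt x]; exact hc
        simp only [bShrink, if_neg hc]
        rw [trimTo, if_neg hcx]
        exact ⟨rfl, hcnt⟩

lemma bLoop_spec {m : Int} (hm : 0 ≤ m) (arr : List Int) :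
    ∀ (d R : Nat), arr.length - R = d → R ≤ arr.length →
    ∀ (W : List Int) (cnt : PySem.Dict Int Int) (res : Int),
      IsLGS m (arr.take R) W →
      (∀ y, cnt.getD y 0 = (W.count y : Int)) →
      bLoop m arr (PySem.List.enumerate (arr.drop R) R) cnt ((R : Int) - W.length) res
        = res + winSum m arr R := by
  intro d
  induction d with
  | zero =>
    intro R hd hR W cnt res _ _
    have hRn : R = arr.length := by omega
    subst hRn
    rw [List.drop_length]
    simp [PySem.List.enumerate_nil, bLoop, winSum]
  | succ d ihd =>
    intro R hd hR W cnt res hW hcnt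
    have hRlt : R < arr.length := by omega
    have hdrop : arr.drop R = arr[R]'hRlt :: arr.drop (R + 1) := List.drop_eq_getElem_cons hRlt
    rw [hdrop, PySem.List.enumerate_cons]
    simp only [bLoop]
    have hWlen : W.length ≤ R := by
      have h1 := hW.1.length_le
      simpa [List.length_take, Nat.min_eq_left hR] using h1
    have htake : arr.take (R + 1) = arr.take R ++ [arr[R]'hRlt] := List.take_succ_eq_append_getElem hRlt
    have hcnt1 : ∀ z, (cnt.insert (arr[R]'hRlt) (cnt.getD (arr[R]'hRlt) 0 + 1)).getD z 0
        = (((W ++ [arr[R]'hRlt]).count z : Nat) : Int) := by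
      intro z
      rw [PySem.Dict.getD_insert]
      have : (W ++ [arr[R]'hRlt]).count z = W.count z + (if z = arr[R]'hRlt then 1 else 0) := count_concat _ _ _
      rw [this]
      by_cases hz : z = arr[R]'hRlt
      · rw [if_pos hz, if_pos hz, hz, hcnt (arr[R]'hRlt)]; push_cast; ring
      · rw [if_neg hz, if_neg hz, hcnt z]; push_cast; ring
    have hsufx : W ++ [arr[R]'hRlt] <:+ arr.take (R + 1) := by
      rw [htake]; exact suffix_append_right hW.1 [arr[R]'hRlt]
    have hfuel : (W ++ [arr[R]'hRlt]).length ≤ arr.length := by simp; omega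
    have hleft : (R : Int) - (W.length : Int) = (((R + 1 : Nat)) : Int) - (((W ++ [arr[R]'hRlt]).length : Nat) : Int) := by
      simp only [List.length_append, List.length_singleton]; push_cast; ring
    rw [hleft]
    obtain ⟨hp2, hp1⟩ := bShrink_spec hm arr (R + 1) (by omega) (W ++ [arr[R]'hRlt]) arr.length
      (cnt.insert (arr[R]'hRlt) (cnt.getD (arr[R]'hRlt) 0 + 1)) hsufx hfuel hcnt1
    have hW' : trimTo m (arr[R]'hRlt) (W ++ [arr[R]'hRlt]) = trimAll m (arr.take (R + 1)) := by
      apply lgs_unique _ (trimAll_isLGS m (arr.take (R + 1)))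
      rw [htake]
      exact trimTo_isLGS hW
    rw [hW'] at hp2 hp1
    rw [hp2]
    have hW'len : (trimAll m (arr.take (R + 1))).length ≤ R + 1 := by
      have h1 := (trimAll_isLGS m (arr.take (R + 1))).1.length_le
      have h2 : (arr.take (R + 1)).length = R + 1 := by
        rw [List.length_take]; omega
      omega
    have hres : (R : Int) - ((((R + 1 : Nat)) : Int) - ((trimAll m (arr.take (R + 1))).length : Int)) + 1
        = ((trimAll m (arr.take (R + 1))).length : Int) := by push_cast; ring
    have hstart : (R : Int) + 1 = (((R + 1 : Nat)) : Int) := by push_cast; ring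
    rw [hres, hstart]
    rw [ihd (R + 1) (by omega) (by omega) (trimAll m (arr.take (R + 1))) _ _ (trimAll_isLGS m (arr.take (R + 1))) hp1]
    have hws : winSum m arr R = ((trimAll m (arr.take (R + 1))).length : Int) + winSum m arr (R + 1) := by
      unfold winSum
      have h1 : arr.length - R = (arr.length - (R + 1)) + 1 := by omega
      rw [h1, Finset.sum_range_succ']
      have h2 : ∀ t, R + (t + 1) + 1 = R + 1 + t + 1 := by intro t; omega
      rw [Finset.sum_congr rfl (fun t _ => by rw [h2 t])]
      ring_nf
    rw [hws]
    ring

lemma bAtMost_spec {m : Int} (hm : 0 ≤ m) (arr : List Int) : bAtMost m arr = winSum m arr 0 := by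
  have h := bLoop_spec hm arr arr.length 0 (by omega) (by omega) []
    PySem.Dict.empty 0
    ⟨by simp, by simp [goodAll], by intro s hs _; simp at hs; simp [hs]⟩
    (by intro y; simp [PySem.Dict.getD_empty])
  simpa [bAtMost] using h

-- counting form of the longest-good-suffix length
lemma trimAll_len (m : Int) (p : List Int) :
    ((trimAll m p).length : Int)
      = ∑ i ∈ Finset.range p.length, (if goodAll m (p.drop i) then (1 : Int) else 0) := by
  have hLle : (trimAll m p).length ≤ p.length := (trimAll_isLGS m p).1.length_le
  have hiff : ∀ i, i < p.length →
      (goodAll m (p.drop i) = true ↔ p.length - (trimAll m p).length ≤ i) := by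
    intro i hi
    constructor
    · intro hg
      have h1 := (trimAll_isLGS m p).2.2 (p.drop i) (List.drop_suffix i p) hg
      rw [List.length_drop] at h1
      omega
    · intro hge
      have hlen : (p.drop i).length ≤ (trimAll m p).length := by rw [List.length_drop]; omega
      have hsub : p.drop i <:+ trimAll m p :=
        List.suffix_of_suffix_length_le (List.drop_suffix i p) (trimAll_isLGS m p).1 hlen
      exact goodAll_of_sublist hsub.sublist (trimAll_isLGS m p).2.1
  have h1 : (∑ i ∈ Finset.range p.length, (if goodAll m (p.drop i) then (1 : Int) else 0))
      = ∑ i ∈ Finset.range p.length, (if p.length - (trimAll m p).length ≤ i then (1 : Int) else 0) := by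
    apply Finset.sum_congr rfl
    intro i hi
    by_cases h : p.length - (trimAll m p).length ≤ i
    · rw [if_pos ((hiff i (Finset.mem_range.mp hi)).mpr h), if_pos h]
    · rw [if_neg (fun hgb => h ((hiff i (Finset.mem_range.mp hi)).mp hgb)), if_neg h]
  rw [h1, ← Finset.sum_range_add_sum_Ico _ (show p.length - (trimAll m p).length ≤ p.length by omega)]
  have h2 : (∑ i ∈ Finset.range (p.length - (trimAll m p).length),
      (if p.length - (trimAll m p).length ≤ i then (1 : Int) else 0)) = 0 := by
    apply Finset.sum_eq_zero
    intro i hi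
    exact if_neg (by have := Finset.mem_range.mp hi; omega)
  have h3 : (∑ i ∈ Finset.Ico (p.length - (trimAll m p).length) p.length,
      (if p.length - (trimAll m p).length ≤ i then (1 : Int) else 0))
      = ((trimAll m p).length : Int) := by
    rw [Finset.sum_congr rfl (fun i hi => if_pos (Finset.mem_Ico.mp hi).1)]
    simp [Nat.card_Ico]
    omega
  rw [h2, h3]
  ring

lemma prefGood_sum (m : Int) :
    ∀ (l p : List Int),
      prefGood m p l = ∑ t ∈ Finset.range l.length, (if goodAll m (p ++ l.take (t + 1)) then (1 : Int) else 0) := by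
  intro l
  induction l with
  | nil => intro p; simp [prefGood]
  | cons x rest ih =>
    intro p
    simp only [prefGood, List.length_cons]
    rw [Finset.sum_range_succ']
    have h0 : (x :: rest).take 1 = [x] := rfl
    have hstep : ∀ t, p ++ (x :: rest).take (t + 1 + 1) = (p ++ [x]) ++ rest.take (t + 1) := by
      intro t
      rw [List.take_succ_cons, List.append_cons]
    rw [Finset.sum_congr rfl (fun t _ => by rw [hstep t])]
    rw [ih (p ++ [x]), h0]
    ring

lemma sumT_sum (m : Int) (arr : List Int) :
    sumT m arr = ∑ i ∈ Finset.range arr.length, prefGood m [] (arr.drop i) := by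
  induction arr with
  | nil => simp [sumT]
  | cons x rest ih =>
    simp only [sumT, List.length_cons]
    rw [Finset.sum_range_succ']
    simp only [List.drop_succ_cons, List.drop_zero]
    rw [ih]
    ring

-- the double-counting exchange: tails-of-prefixes vs prefixes-of-tails
lemma sumT_eq_winSum (m : Int) (arr : List Int) : sumT m arr = winSum m arr 0 := by
  have key1 : ∀ i, i < arr.length →
      prefGood m [] (arr.drop i)
        = ∑ r ∈ Finset.range arr.length,
            (if i ≤ r ∧ goodAll m ((arr.take (r + 1)).drop i) then (1 : Int) else 0) := by
    intro i hi
    rw [prefGood_sum, ← Finset.sum_range_add_sum_Ico _ (show i ≤ arr.length by omega)]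
    have h2 : (∑ r ∈ Finset.range i,
        (if i ≤ r ∧ goodAll m ((arr.take (r + 1)).drop i) then (1 : Int) else 0)) = 0 := by
      apply Finset.sum_eq_zero
      intro r hr
      exact if_neg (by have := Finset.mem_range.mp hr; omega)
    have h3 : (∑ r ∈ Finset.Ico i arr.length,
        (if i ≤ r ∧ goodAll m ((arr.take (r + 1)).drop i) then (1 : Int) else 0))
        = ∑ r ∈ Finset.Ico i arr.length,
            (if goodAll m ((arr.take (r + 1)).drop i) then (1 : Int) else 0) := by
      apply Finset.sum_congr rfl
      intro r hr
      exact if_congr (Iff.intro (fun h => h.2) (fun h => ⟨(Finset.mem_Ico.mp hr).1, h⟩)) rfl rfl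
    rw [h2, h3, Finset.sum_Ico_eq_sum_range, List.length_drop]
    have h4 : ∀ t, t ∈ Finset.range (arr.length - i) →
        (if goodAll m ([] ++ (arr.drop i).take (t + 1)) then (1 : Int) else 0)
          = (if goodAll m ((arr.take (i + t + 1)).drop i) then (1 : Int) else 0) := by
      intro t _
      have hwin : (arr.drop i).take (t + 1) = (arr.take (i + t + 1)).drop i := by
        rw [List.drop_take]
        congr 1
        omega
      rw [List.nil_append, hwin]
    rw [Finset.sum_congr rfl h4]
    rw [Finset.sum_congr rfl (fun t _ => by rw [show i + t + 1 = i + (t + 1) from by omega])]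
    simp
  have key2 : ∀ r, r < arr.length →
      ((trimAll m (arr.take (r + 1))).length : Int)
        = ∑ i ∈ Finset.range arr.length,
            (if i ≤ r ∧ goodAll m ((arr.take (r + 1)).drop i) then (1 : Int) else 0) := by
    intro r hr
    rw [trimAll_len]
    have hlen : (arr.take (r + 1)).length = r + 1 := by rw [List.length_take]; omega
    rw [hlen, ← Finset.sum_range_add_sum_Ico _ (show r + 1 ≤ arr.length by omega)]
    have h2 : (∑ i ∈ Finset.Ico (r + 1) arr.length,
        (if i ≤ r ∧ goodAll m ((arr.take (r + 1)).drop i) then (1 : Int) else 0)) = 0 := by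
      apply Finset.sum_eq_zero
      intro i hi
      exact if_neg (by have := Finset.mem_Ico.mp hi; omega)
    have h3 : (∑ i ∈ Finset.range (r + 1),
        (if goodAll m ((arr.take (r + 1)).drop i) then (1 : Int) else 0))
        = ∑ i ∈ Finset.range (r + 1),
            (if i ≤ r ∧ goodAll m ((arr.take (r + 1)).drop i) then (1 : Int) else 0) := by
      apply Finset.sum_congr rfl
      intro i hi
      exact if_congr (Iff.intro (fun h => ⟨by have := Finset.mem_range.mp hi; omega, h⟩) (fun h => h.2)) rfl rfl
    rw [h3, h2]
    ring
  rw [sumT_sum, Finset.sum_congr rfl (fun i hi => key1 i (Finset.mem_range.mp hi)),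
      Finset.sum_comm]
  unfold winSum
  rw [Nat.sub_zero]
  rw [Finset.sum_congr rfl (fun r hr => (key2 r (Finset.mem_range.mp hr)).symm)]
  exact Finset.sum_congr rfl (fun r _ => by rw [show 0 + r + 1 = r + 1 from by omega])

lemma leet_nonpos {arr : List Int} {k : Int} (hk : k ≤ 0) : leet_code_36 arr k = 0 := by
  suffices h : ∀ (l : List Int) (res : Int), aOuter k l res = res by
    simpa [leet_code_36] using h arr 0
  intro l
  induction l with
  | nil => intro res; rfl
  | cons x rest ih =>
    intro res
    simp only [aOuter]
    rw [aInner_nonpos hk (x :: rest) PySem.Dict.empty res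
      (by intro z; simp [PySem.Dict.getD_empty])]
    exact ih res

-- ===== VERDICT (by name: the statement is the Claim_ definition above) =====
theorem leet_code_36_spec : Claim_equal_leet_code_36 := by
  intro arr k _
  unfold Spec_leet_code_36 leet_code_36_alt
  by_cases hk : k ≤ 0
  · simp [hk, leet_nonpos hk]
  · have hk1 : 1 ≤ k := by omega
    simp only [if_neg hk]
    have h1 : leet_code_36 arr k = totalA k arr := by
      simpa using aOuter_spec hk1 arr 0
    rw [h1, totalA_decomp, sumT_eq_winSum, sumT_eq_winSum,
        ← bAtMost_spec (by omega : (0:Int) ≤ k), ← bAtMost_spec (by omega : (0:Int) ≤ k - 1)]
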